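-- pv_equiv track=rewrite | github.com/ArijitsPy/QMQC_Project_CCDS | perfect_5_1_3_qec.py | _calculate_syndrome
-- ===== SOURCE A (Python) =====
-- def _calculate_syndrome(error_qubit: int, error_type: str) -> int:
--     """
--     Calculate syndrome bits for a single-qubit error
--     Returns 4-bit syndrome value
--     """
--     syndrome = 0
--
--     stabilizers = [
--         [1, 0, 0, 0, 1],  # XZZXI
--         [0, 1, 0, 0, 1],  # IXZZX
--         [1, 0, 1, 0, 0],  # XIXZZ
--         [0, 1, 0, 1, 0]   # ZXIXZ
--     ]
--
--     # Error mapping: X errors anticommute with Z stabilizers, Z errors with X stabilizers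
--     for stab_idx, stab in enumerate(stabilizers):
--         if error_type in ['X', 'Y']:  # X-type error
--             x_part = [1, 0, 1, 0, 0] if stab_idx < 2 else [1, 0, 1, 0, 0]
--             anticommutes = x_part[error_qubit] & stab[error_qubit]
--         else:  # Z-type error
--             z_part = [0, 0, 1, 1, 1] if stab_idx < 2 else [0, 0, 1, 1, 1]
--             anticommutes = z_part[error_qubit] & stab[error_qubit]
--
--         if anticommutes:
--             syndrome |= (1 << stab_idx)
--
--     return syndrome
-- ===== SOURCE B (Python) =====
-- def _calculate_syndrome(error_qubit: int, error_type: str) -> int: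
--     """
--     Calculate syndrome bits for a single-qubit error
--     Returns 4-bit syndrome value
--     """
--     # Per-qubit syndrome tables: entry q ORs 1<<i over stabilizers i whose
--     # support bit stab[q] is 1 AND the error's Pauli part hits qubit q.
--     # X/Y errors: part [1,0,1,0,0] against stabilizer columns -> [5,0,4,0,0]
--     # Z/other:    part [0,0,1,1,1] against the same columns    -> [0,0,4,8,3]
--     table = [5, 0, 4, 0, 0] if error_type in ('X', 'Y') else [0, 0, 4, 8, 3]
--     return table[error_qubit]
-- ===== Notes on version B (the rewrite author's own statement) =====
-- stated objective: simpler
-- what changed: Replaces the loop over the four stabilizers (bitwise AND and bit-ORing per stabilizer) with a direct lookup in a precomputed 5-entry syndrome table per error type.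
import Mathlib
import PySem

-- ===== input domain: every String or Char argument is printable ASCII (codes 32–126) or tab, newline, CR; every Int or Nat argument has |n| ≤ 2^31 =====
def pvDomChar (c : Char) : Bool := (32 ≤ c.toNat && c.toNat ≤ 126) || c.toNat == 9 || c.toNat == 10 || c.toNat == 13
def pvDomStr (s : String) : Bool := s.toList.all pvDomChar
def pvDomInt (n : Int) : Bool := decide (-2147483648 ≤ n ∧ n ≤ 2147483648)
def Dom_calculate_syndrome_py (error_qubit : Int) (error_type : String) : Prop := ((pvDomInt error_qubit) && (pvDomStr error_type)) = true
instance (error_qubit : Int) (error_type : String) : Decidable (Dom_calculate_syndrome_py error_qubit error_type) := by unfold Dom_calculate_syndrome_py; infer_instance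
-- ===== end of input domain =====

-- B replaces A's loop over the four stabilizers with a direct lookup in a
-- precomputed per-qubit syndrome table (one table per Pauli type): simpler.


-- ===== PORT A =====
-- Literal port of A: fold over enumerate(stabilizers); Python's list indexing
-- part[error_qubit] / stab[error_qubit] is PySem.List.pyGet? (IndexError = none,
-- excluded by Pre_; .getD 0 is only reached outside Pre_).
def calculate_syndrome_py (error_qubit : Int) (error_type : String) : Int :=
  let stabilizers : List (List Int) :=
    [[1, 0, 0, 0, 1], [0, 1, 0, 0, 1], [1, 0, 1, 0, 0], [0, 1, 0, 1, 0]]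
  (PySem.List.enumerate stabilizers).foldl
    (fun (syndrome : Int) (p : Int × List Int) =>
      let stab_idx := p.1
      let stab := p.2
      let anticommutes : Int :=
        if error_type = "X" ∨ error_type = "Y" then
          let x_part : List Int := if stab_idx < 2 then [1, 0, 1, 0, 0] else [1, 0, 1, 0, 0]
          PySem.Int.band ((PySem.List.pyGet? x_part error_qubit).getD 0) ((PySem.List.pyGet? stab error_qubit).getD 0)
        else
          let z_part : List Int := if stab_idx < 2 then [0, 0, 1, 1, 1] else [0, 0, 1, 1, 1]
          PySem.Int.band ((PySem.List.pyGet? z_part error_qubit).getD 0) ((PySem.List.pyGet? stab error_qubit).getD 0)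
      if anticommutes ≠ 0 then PySem.Int.bor syndrome ((1 : Int) <<< stab_idx.toNat) else syndrome)
    0

-- ===== PORT B =====
-- Port of B: select the precomputed table, one indexing operation.
def calculate_syndrome_py_alt (error_qubit : Int) (error_type : String) : Int :=
  let table : List Int :=
    if error_type = "X" ∨ error_type = "Y" then [5, 0, 4, 0, 0] else [0, 0, 4, 8, 3]
  (PySem.List.pyGet? table error_qubit).getD 0

-- ===== PRECONDITION & SPEC =====
-- Pre_ excludes exactly the IndexError: Python A raises unless -5 ≤ error_qubit < 5.
def Pre_calculate_syndrome_py (error_qubit : Int) (error_type : String) : Prop :=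
  PySem.Raise.InRange 5 error_qubit
instance (error_qubit : Int) (error_type : String) : Decidable (Pre_calculate_syndrome_py error_qubit error_type) := by unfold Pre_calculate_syndrome_py; infer_instance
def pvWitness_calculate_syndrome_py : Int × String := (2, "X")

def Spec_calculate_syndrome_py (error_qubit : Int) (error_type : String) (out : Int) : Prop := out = calculate_syndrome_py_alt error_qubit error_type
instance (error_qubit : Int) (error_type : String) (out : Int) : Decidable (Spec_calculate_syndrome_py error_qubit error_type out) := by unfold Spec_calculate_syndrome_py; infer_instance

-- ===== CLAIM (what is proved, stated in full; the proofs are below) =====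
def Claim_equal_calculate_syndrome_py : Prop := ∀ (error_qubit : Int) (error_type : String), Dom_calculate_syndrome_py error_qubit error_type → Pre_calculate_syndrome_py error_qubit error_type → Spec_calculate_syndrome_py error_qubit error_type (calculate_syndrome_py error_qubit error_type)

-- ===== LEMMAS AND PROOFS =====
-- ===== VERDICT (by name: the statement is the Claim_ definition above) =====
theorem calculate_syndrome_py_spec : Claim_equal_calculate_syndrome_py := by
  intro q s _ hpre
  unfold Spec_calculate_syndrome_py calculate_syndrome_py calculate_syndrome_py_alt
  unfold Pre_calculate_syndrome_py at hpre
  have hb : -5 ≤ q ∧ q < 5 := by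
    simpa [PySem.Raise.InRange] using hpre
  obtain ⟨h1, h2⟩ := hb
  by_cases h : s = "X" ∨ s = "Y"
  · simp only [if_pos h]
    interval_cases q <;> decide
  · simp only [if_neg h]
    interval_cases q <;> decide
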